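-- pv_equiv track=rewrite | github.com/vdumchiviy/just_interesting_tasks | codesignal_com/codesignal_com022.py | solution
-- ===== SOURCE A (Python) =====
-- def solution(matrix):
--     def get_value(r, c):
--         if r < 0 or c < 0 or r >= len(matrix) or c >= len(matrix[r]):
--             return 0
--         else:
--             return 1 if matrix[r][c] else 0
--
--     result = list()
--     for row in range(len(matrix)):
--         element = list()
--         for col in range(len(matrix[row])):
--             element.append(get_value(row-1, col-1)+get_value(row-1, col)+get_value(row-1, col+1) +
--                            get_value(row, col-1) + get_value(row, col+1) +
--                            get_value(row+1, col-1)+get_value(row+1, col)+get_value(row+1, col+1))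
--         result.append(element)
--     return result
-- ===== SOURCE B (Python) =====
-- def solution(matrix):
--     # Scatter instead of gather: every truthy cell adds 1 to each in-bounds neighbor.
--     result = [[0] * len(row) for row in matrix]
--     for r in range(len(matrix)):
--         for c in range(len(matrix[r])):
--             if matrix[r][c]:
--                 for dr in (-1, 0, 1):
--                     for dc in (-1, 0, 1):
--                         if dr or dc:
--                             nr, nc = r + dr, c + dc
--                             if 0 <= nr < len(matrix) and 0 <= nc < len(matrix[nr]):
--                                 result[nr][nc] += 1
--     return result
-- ===== Notes on version B (the rewrite author's own statement) =====
-- stated objective: alternative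
-- what changed: B scatters +1 from each truthy cell to its in-bounds neighbors over a preallocated zero grid, instead of A's per-cell gather of eight bound-checked helper-function lookups.
import Mathlib
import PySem

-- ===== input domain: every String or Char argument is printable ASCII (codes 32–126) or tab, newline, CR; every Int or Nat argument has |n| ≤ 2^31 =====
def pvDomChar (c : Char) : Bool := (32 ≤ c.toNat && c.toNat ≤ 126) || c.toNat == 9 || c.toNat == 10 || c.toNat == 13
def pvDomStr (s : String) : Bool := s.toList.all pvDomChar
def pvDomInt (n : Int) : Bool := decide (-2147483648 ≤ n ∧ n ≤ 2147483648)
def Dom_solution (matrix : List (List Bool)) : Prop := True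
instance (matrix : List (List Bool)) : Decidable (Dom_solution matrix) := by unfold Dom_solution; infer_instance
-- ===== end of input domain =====

-- B scatters +1 from each truthy cell to its in-bounds neighbors over a zero grid,
-- instead of A's per-cell gather of eight bound-checked lookups; same cost, different traversal.

-- ===== PORT A =====
-- A's inner helper get_value (the guard makes every access in range, so getD is exact)
def getv (matrix : List (List Bool)) (r c : Int) : Int :=
  if r < 0 ∨ c < 0 ∨ (matrix.length : Int) ≤ r ∨ (((matrix.getD r.toNat []).length : Int)) ≤ c then 0
  else if (matrix.getD r.toNat []).getD c.toNat false then 1 else 0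

def solution (matrix : List (List Bool)) : List (List Int) :=
  (List.range matrix.length).map (fun (row : Nat) =>
    (List.range ((matrix.getD row []).length)).map (fun (col : Nat) =>
      getv matrix ((row : Int)-1) ((col : Int)-1) + getv matrix ((row : Int)-1) (col : Int) +
        getv matrix ((row : Int)-1) ((col : Int)+1) +
      getv matrix (row : Int) ((col : Int)-1) + getv matrix (row : Int) ((col : Int)+1) +
      getv matrix ((row : Int)+1) ((col : Int)-1) + getv matrix ((row : Int)+1) (col : Int) +
        getv matrix ((row : Int)+1) ((col : Int)+1)))

-- ===== PORT B =====
-- bounds-checked `result[nr][nc] += 1`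
def pvInc (matrix : List (List Bool)) (g : List (List Int)) (nr nc : Int) : List (List Int) :=
  if 0 ≤ nr ∧ nr < (matrix.length : Int) ∧ 0 ≤ nc ∧ nc < ((matrix.getD nr.toNat []).length : Int) then
    g.modify nr.toNat (fun row => row.modify nc.toNat (· + 1))
  else g

-- the two offset loops with the (dr or dc) skip
def pvScatter (matrix : List (List Bool)) (r c : Nat) (g : List (List Int)) : List (List Int) :=
  [(-1 : Int), 0, 1].foldl (fun g dr =>
    [(-1 : Int), 0, 1].foldl (fun g dc =>
      if ¬(dr = 0 ∧ dc = 0) then pvInc matrix g ((r : Int) + dr) ((c : Int) + dc) else g) g) g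

def solution_alt (matrix : List (List Bool)) : List (List Int) :=
  (List.range matrix.length).foldl (fun g r =>
    (List.range ((matrix.getD r []).length)).foldl (fun g c =>
      if (matrix.getD r []).getD c false then pvScatter matrix r c g else g) g)
    (matrix.map (fun row => row.map (fun _ => (0 : Int))))

-- ===== PRECONDITION & SPEC =====
def Spec_solution (matrix : List (List Bool)) (out : List (List Int)) : Prop := out = solution_alt matrix
instance (matrix : List (List Bool)) (out : List (List Int)) : Decidable (Spec_solution matrix out) := by unfold Spec_solution; infer_instance

-- ===== CLAIM (what is proved, stated in full; the proofs are below) =====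
def Claim_equal_solution : Prop := ∀ (matrix : List (List Bool)), Dom_solution matrix → Spec_solution matrix (solution matrix)

-- ===== LEMMAS AND PROOFS =====

-- proof-only accessors
def pvGet (g : List (List Int)) (r c : Nat) : Int := (g.getD r []).getD c 0

-- neighbor indicator: cell (i,j) is one of the 8 neighbors of (r,c)
def pvNb (i j r c : Nat) : Int :=
  if (((i:Int) = (r:Int)-1 ∨ (i:Int) = (r:Int) ∨ (i:Int) = (r:Int)+1) ∧
      ((j:Int) = (c:Int)-1 ∨ (j:Int) = (c:Int) ∨ (j:Int) = (c:Int)+1) ∧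
      ¬((i:Int) = (r:Int) ∧ (j:Int) = (c:Int))) then 1 else 0

def pvRowSum (m : List (List Bool)) (i r c : Nat) : Int :=
  ((List.range ((m.getD i []).length)).map
    (fun j => if (m.getD i []).getD j false then pvNb i j r c else 0)).sum

lemma pvShape_inc (m : List (List Bool)) (g : List (List Int)) (a b : Int) :
    (pvInc m g a b).map List.length = g.map List.length := by
  unfold pvInc
  split
  · apply List.ext_getElem
    · simp
    · intro i h1 h2
      simp [List.getElem_modify]
      split <;> simp [List.length_modify]
  · rfl

lemma pvShape_scatter (m : List (List Bool)) (i j : Nat) (g : List (List Int)) :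
    (pvScatter m i j g).map List.length = g.map List.length := by
  simp only [pvScatter, List.foldl]
  norm_num
  simp only [pvShape_inc]

lemma pvGet_inc (m : List (List Bool)) (g : List (List Int)) (a b : Int) (r c : Nat)
    (hs : g.map List.length = m.map List.length) (hr : r < m.length)
    (hc : c < (m.getD r []).length) :
    pvGet (pvInc m g a b) r c
      = pvGet g r c + (if a = (r:Int) ∧ b = (c:Int) then 1 else 0) := by
  have hgl : g.length = m.length := by
    have := congrArg List.length hs; simpa using this
  have hrg : r < g.length := by omega
  have hrow : g[r].length = (m.getD r []).length := by
    have h1 := congrArg (fun l => l[r]?) hs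
    simp only [List.getElem?_map, List.getElem?_eq_getElem hrg,
      List.getElem?_eq_getElem hr, Option.map_some] at h1
    rw [List.getD_eq_getElem _ _ hr]
    exact Option.some.inj h1
  have hcg : c < g[r].length := by omega
  have e0 : g.getD r [] = g[r] := List.getD_eq_getElem _ _ hrg
  by_cases hab : a = (r:Int) ∧ b = (c:Int)
  · obtain ⟨ha, hb⟩ := hab
    have hat : a.toNat = r := by omega
    have hbt : b.toNat = c := by omega
    have hguard : 0 ≤ a ∧ a < (m.length : Int) ∧ 0 ≤ b ∧
        b < ((m.getD a.toNat []).length : Int) := by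
      refine ⟨by omega, by omega, by omega, ?_⟩
      rw [hat]; omega
    have e1 : pvInc m g a b = g.modify r (fun row => row.modify c (· + 1)) := by
      rw [pvInc, if_pos hguard, hat, hbt]
    have e2 : (g.modify r (fun row => row.modify c (· + 1))).getD r []
        = g[r].modify c (· + 1) := by
      rw [List.getD_eq_getElem _ _ (by simpa [List.length_modify] using hrg),
        List.getElem_modify, if_pos rfl]
    have e3 : (g[r].modify c (· + 1)).getD c 0 = g[r].getD c 0 + 1 := by
      rw [List.getD_eq_getElem _ _ (by simpa [List.length_modify] using hcg),
        List.getElem_modify, if_pos rfl, List.getD_eq_getElem _ _ hcg]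
    rw [pvGet, pvGet, e1, e2, e3, e0, if_pos ⟨ha, hb⟩]
  · rw [if_neg hab]
    unfold pvInc
    split
    · rename_i hguard
      obtain ⟨h0a, hltA, h0b, hltB⟩ := hguard
      by_cases har : a.toNat = r
      · have hbc : b.toNat ≠ c := by omega
        have e2 : (g.modify a.toNat (fun row => row.modify b.toNat (· + 1))).getD r []
            = g[r].modify b.toNat (· + 1) := by
          rw [List.getD_eq_getElem _ _ (by simpa [List.length_modify] using hrg),
            List.getElem_modify, if_pos har]
        have e3 : (g[r].modify b.toNat (· + 1)).getD c 0 = g[r].getD c 0 := by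
          rw [List.getD_eq_getElem _ _ (by simpa [List.length_modify] using hcg),
            List.getElem_modify, if_neg hbc, List.getD_eq_getElem _ _ hcg]
        rw [pvGet, pvGet, e2, e3, e0]
        ring
      · have e2 : (g.modify a.toNat (fun row => row.modify b.toNat (· + 1))).getD r []
            = g[r] := by
          rw [List.getD_eq_getElem _ _ (by simpa [List.length_modify] using hrg),
            List.getElem_modify, if_neg har]
        rw [pvGet, pvGet, e2, e0]
        ring
    · rw [pvGet]
      ring

lemma pvFoldInc (m : List (List Bool)) (r c : Nat) (hr : r < m.length)
    (hc : c < (m.getD r []).length) (i j : Nat) :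
    ∀ (L : List (Int × Int)) (g : List (List Int)),
      g.map List.length = m.map List.length →
      pvGet (L.foldl (fun g p => pvInc m g ((i:Int)+p.1) ((j:Int)+p.2)) g) r c
        = pvGet g r c
          + (L.map (fun p =>
              if (i:Int)+p.1 = (r:Int) ∧ (j:Int)+p.2 = (c:Int) then (1:Int) else 0)).sum := by
  intro L
  induction L with
  | nil => intro g hg; simp
  | cons p L ih =>
    intro g hg
    simp only [List.foldl_cons, List.map_cons, List.sum_cons]
    rw [ih _ (by rw [pvShape_inc]; exact hg), pvGet_inc m g _ _ r c hg hr hc]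
    ring

lemma pvGet_scatter (m : List (List Bool)) (g : List (List Int)) (i j r c : Nat)
    (hs : g.map List.length = m.map List.length) (hr : r < m.length)
    (hc : c < (m.getD r []).length) :
    pvGet (pvScatter m i j g) r c = pvGet g r c + pvNb i j r c := by
  have e : pvScatter m i j g
      = ([((-1:Int),(-1:Int)), (-1,0), (-1,1), (0,-1), (0,1), (1,-1), (1,0), (1,1)]
          : List (Int × Int)).foldl
            (fun g p => pvInc m g ((i:Int)+p.1) ((j:Int)+p.2)) g := by
    simp only [pvScatter, List.foldl]
    norm_num
  rw [e, pvFoldInc m r c hr hc i j _ g hs]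
  simp only [List.map_cons, List.map_nil, List.sum_cons, List.sum_nil]
  unfold pvNb
  split_ifs <;> omega

lemma pvShape_rowfold (m : List (List Bool)) (i : Nat) :
    ∀ (L : List Nat) (g : List (List Int)),
      (L.foldl (fun g c => if (m.getD i []).getD c false then pvScatter m i c g else g) g).map
        List.length = g.map List.length := by
  intro L
  induction L with
  | nil => intro g; rfl
  | cons j L ih =>
    intro g
    simp only [List.foldl_cons]
    rw [ih]
    split
    · rw [pvShape_scatter]
    · rfl

lemma pvRow_fold (m : List (List Bool)) (r c : Nat) (hr : r < m.length)
    (hc : c < (m.getD r []).length) (i : Nat) :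
    ∀ (L : List Nat) (g : List (List Int)),
      g.map List.length = m.map List.length →
      pvGet (L.foldl (fun g c' => if (m.getD i []).getD c' false then pvScatter m i c' g else g) g) r c
        = pvGet g r c
          + (L.map (fun j => if (m.getD i []).getD j false then pvNb i j r c else 0)).sum := by
  intro L
  induction L with
  | nil => intro g hg; simp
  | cons j L ih =>
    intro g hg
    simp only [List.foldl_cons, List.map_cons, List.sum_cons]
    by_cases hv : (m.getD i []).getD j false
    · rw [if_pos hv, if_pos hv, ih _ (by rw [pvShape_scatter]; exact hg),
        pvGet_scatter m g i j r c hg hr hc]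
      ring
    · rw [if_neg hv, if_neg hv, ih _ hg]
      ring

lemma pvCol_fold (m : List (List Bool)) (r c : Nat) (hr : r < m.length)
    (hc : c < (m.getD r []).length) :
    ∀ (L : List Nat) (g : List (List Int)),
      g.map List.length = m.map List.length →
      pvGet (L.foldl (fun g i =>
          (List.range ((m.getD i []).length)).foldl
            (fun g c' => if (m.getD i []).getD c' false then pvScatter m i c' g else g) g) g) r c
        = pvGet g r c + (L.map (fun i => pvRowSum m i r c)).sum := by
  intro L
  induction L with
  | nil => intro g hg; simp
  | cons i L ih =>
    intro g hg
    simp only [List.foldl_cons, List.map_cons, List.sum_cons]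
    rw [ih _ (by rw [pvShape_rowfold]; exact hg), pvRow_fold m r c hr hc i _ g hg]
    rw [pvRowSum]
    ring

lemma pvSumAdd (L : List Nat) (f g : Nat → Int) :
    (L.map (fun x => f x + g x)).sum = (L.map f).sum + (L.map g).sum := by
  induction L with
  | nil => simp
  | cons x L ih => simp only [List.map_cons, List.sum_cons, ih]; ring

lemma pvHit (P : Nat → Bool) (t : Int) :
    ∀ n : Nat, ((List.range n).map (fun j => if P j ∧ (j:Int) = t then (1:Int) else 0)).sum
      = if 0 ≤ t ∧ t < (n:Int) ∧ P t.toNat then 1 else 0 := by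
  intro n
  induction n with
  | zero =>
    simp only [List.range_zero, List.map_nil, List.sum_nil]
    split_ifs with h
    · exfalso; omega
    · rfl
  | succ n ih =>
    rw [List.range_succ, List.map_append, List.sum_append, ih]
    simp only [List.map_cons, List.map_nil, List.sum_cons, List.sum_nil, add_zero]
    by_cases hnt : (n:Int) = t
    · have htn : t.toNat = n := by omega
      rw [htn]
      by_cases hP : P n
      · simp only [hP, and_true, true_and, if_pos hnt]
        split_ifs <;> push_cast <;> omega
      · simp [hP]
    · have h2 : ¬(P n ∧ (n:Int) = t) := fun h => hnt h.2
      rw [if_neg h2, add_zero]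
      have hiff : ((0:Int) ≤ t ∧ t < (n:Int) ∧ P t.toNat)
          ↔ ((0:Int) ≤ t ∧ t < ((n+1 : Nat):Int) ∧ P t.toNat) := by
        constructor <;> rintro ⟨a, b, cc⟩ <;> exact ⟨a, by push_cast at *; omega, cc⟩
      split_ifs with u v v
      · rfl
      · exact absurd (hiff.mp u) v
      · exact absurd (hiff.mpr v) u
      · rfl

lemma pvHitC (A t : Int) :
    ∀ n : Nat, ((List.range n).map (fun (i : Nat) => if (i:Int) = t then A else 0)).sum
      = if 0 ≤ t ∧ t < (n:Int) then A else 0 := by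
  intro n
  induction n with
  | zero =>
    simp only [List.range_zero, List.map_nil, List.sum_nil]
    split_ifs with h
    · exfalso; omega
    · rfl
  | succ n ih =>
    rw [List.range_succ, List.map_append, List.sum_append, ih]
    simp only [List.map_cons, List.map_nil, List.sum_cons, List.sum_nil, add_zero]
    split_ifs <;> push_cast at * <;> omega

lemma pvGetv_in (m : List (List Bool)) (i : Nat) (hi : i < m.length) (t : Int) :
    getv m (i:Int) t
      = if 0 ≤ t ∧ t < ((m.getD i []).length : Int) ∧ (m.getD i []).getD t.toNat false
        then 1 else 0 := by
  unfold getv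
  simp only [Int.toNat_natCast]
  by_cases hP : (m.getD i []).getD t.toNat false
  · simp only [hP, and_true, if_true]
    split_ifs <;> omega
  · have hno : ¬(0 ≤ t ∧ t < ((m.getD i []).length : Int) ∧
        (m.getD i []).getD t.toNat false = true) := by
      rintro ⟨-, -, hcc⟩; exact hP hcc
    rw [if_neg hno]
    split_ifs <;> rfl

lemma pvGetv_oob (m : List (List Bool)) (t u : Int) (h : t < 0 ∨ (m.length : Int) ≤ t) :
    getv m t u = 0 := by
  unfold getv
  rw [if_pos]
  omega

lemma pvRowSum_eval (m : List (List Bool)) (r c i : Nat) (hi : i < m.length) :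
    pvRowSum m i r c
      = if (i:Int) = (r:Int)-1 ∨ (i:Int) = (r:Int)+1 then
          getv m (i:Int) ((c:Int)-1) + getv m (i:Int) (c:Int) + getv m (i:Int) ((c:Int)+1)
        else if (i:Int) = (r:Int) then
          getv m (i:Int) ((c:Int)-1) + getv m (i:Int) ((c:Int)+1)
        else 0 := by
  unfold pvRowSum
  by_cases h1 : (i:Int) = (r:Int)-1 ∨ (i:Int) = (r:Int)+1
  · rw [if_pos h1]
    have hpoint : ∀ j ∈ List.range ((m.getD i []).length),
        (if (m.getD i []).getD j false then pvNb i j r c else 0)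
          = ((if (m.getD i []).getD j false ∧ (j:Int) = (c:Int)-1 then (1:Int) else 0)
              + (if (m.getD i []).getD j false ∧ (j:Int) = (c:Int) then (1:Int) else 0))
            + (if (m.getD i []).getD j false ∧ (j:Int) = (c:Int)+1 then (1:Int) else 0) := by
      intro j _
      by_cases hv : (m.getD i []).getD j false
      · simp only [hv, if_true, true_and]
        unfold pvNb
        split_ifs <;> omega
      · rw [if_neg hv, if_neg (fun h => hv (And.left h)), if_neg (fun h => hv (And.left h)),
          if_neg (fun h => hv (And.left h))]
        ring
    rw [List.map_congr_left hpoint, pvSumAdd, pvSumAdd, pvHit, pvHit, pvHit,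
      pvGetv_in m i hi ((c:Int)-1), pvGetv_in m i hi (c:Int), pvGetv_in m i hi ((c:Int)+1)]
  · rw [if_neg h1]
    by_cases h2 : (i:Int) = (r:Int)
    · rw [if_pos h2]
      have hpoint : ∀ j ∈ List.range ((m.getD i []).length),
          (if (m.getD i []).getD j false then pvNb i j r c else 0)
            = (if (m.getD i []).getD j false ∧ (j:Int) = (c:Int)-1 then (1:Int) else 0)
              + (if (m.getD i []).getD j false ∧ (j:Int) = (c:Int)+1 then (1:Int) else 0) := by
        intro j _
        by_cases hv : (m.getD i []).getD j false
        · simp only [hv, if_true, true_and]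
          unfold pvNb
          split_ifs <;> omega
        · rw [if_neg hv, if_neg (fun h => hv (And.left h)), if_neg (fun h => hv (And.left h))]
          ring
      rw [List.map_congr_left hpoint, pvSumAdd, pvHit, pvHit,
        pvGetv_in m i hi ((c:Int)-1), pvGetv_in m i hi ((c:Int)+1)]
    · rw [if_neg h2]
      have hpoint : ∀ j ∈ List.range ((m.getD i []).length),
          (if (m.getD i []).getD j false then pvNb i j r c else 0) = (0:Int) := by
        intro j _
        by_cases hv : (m.getD i []).getD j false
        · simp only [hv, if_true]
          unfold pvNb
          rw [if_neg]
          omega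
        · rw [if_neg hv]
      rw [List.map_congr_left hpoint]
      simp

lemma pvGet_init (m : List (List Bool)) (r c : Nat) :
    pvGet (m.map (fun row => row.map (fun _ => (0:Int)))) r c = 0 := by
  unfold pvGet
  have h1 : (List.map (fun row => List.map (fun _ => (0:Int)) row) m).getD r []
      = List.map (fun _ => (0:Int)) (m.getD r []) := by
    rw [List.getD_eq_getElem?_getD, List.getElem?_map, List.getD_eq_getElem?_getD]
    cases m[r]? <;> simp
  rw [h1, List.getD_eq_getElem?_getD, List.getElem?_map]
  cases (m.getD r [])[c]? <;> simp

lemma pvShape_init (m : List (List Bool)) :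
    ((m.map (fun row => row.map (fun _ => (0:Int)))).map List.length) = m.map List.length := by
  simp

lemma pvShape_colfold (m : List (List Bool)) :
    ∀ (L : List Nat) (g : List (List Int)),
      ((L.foldl (fun g i =>
          (List.range ((m.getD i []).length)).foldl
            (fun g c' => if (m.getD i []).getD c' false then pvScatter m i c' g else g) g) g).map
        List.length) = g.map List.length := by
  intro L
  induction L with
  | nil => intro g; rfl
  | cons i L ih =>
    intro g
    simp only [List.foldl_cons]
    rw [ih, pvShape_rowfold]

lemma pvShape_alt (m : List (List Bool)) :
    (solution_alt m).map List.length = m.map List.length := by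
  unfold solution_alt
  rw [pvShape_colfold, pvShape_init]

lemma pvMain (m : List (List Bool)) (r c : Nat) (hr : r < m.length)
    (hc : c < (m.getD r []).length) :
    pvGet (solution_alt m) r c
      = getv m ((r:Int)-1) ((c:Int)-1) + getv m ((r:Int)-1) (c:Int) + getv m ((r:Int)-1) ((c:Int)+1) +
        getv m (r:Int) ((c:Int)-1) + getv m (r:Int) ((c:Int)+1) +
        getv m ((r:Int)+1) ((c:Int)-1) + getv m ((r:Int)+1) (c:Int) + getv m ((r:Int)+1) ((c:Int)+1) := by
  unfold solution_alt
  rw [pvCol_fold m r c hr hc (List.range m.length) _ (pvShape_init m), pvGet_init]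
  have hpoint : ∀ i ∈ List.range m.length, pvRowSum m i r c
      = ((if (i:Int) = (r:Int)-1 then
            getv m ((r:Int)-1) ((c:Int)-1) + getv m ((r:Int)-1) (c:Int) + getv m ((r:Int)-1) ((c:Int)+1)
          else 0)
        + (if (i:Int) = (r:Int) then
            getv m (r:Int) ((c:Int)-1) + getv m (r:Int) ((c:Int)+1)
          else 0))
        + (if (i:Int) = (r:Int)+1 then
            getv m ((r:Int)+1) ((c:Int)-1) + getv m ((r:Int)+1) (c:Int) + getv m ((r:Int)+1) ((c:Int)+1)
          else 0) := by
    intro i him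
    rw [List.mem_range] at him
    rw [pvRowSum_eval m r c i him]
    by_cases e1 : (i:Int) = (r:Int)-1
    · rw [if_pos (Or.inl e1), e1, if_pos rfl, if_neg (by omega), if_neg (by omega)]
      ring
    · by_cases e2 : (i:Int) = (r:Int)
      · rw [if_neg (by omega), if_pos e2, e2, if_neg (by omega), if_pos rfl, if_neg (by omega)]
        ring
      · by_cases e3 : (i:Int) = (r:Int)+1
        · rw [if_pos (Or.inr e3), e3, if_neg (by omega), if_neg (by omega), if_pos rfl]
          ring
        · rw [if_neg (by omega), if_neg e2, if_neg e1, if_neg e2, if_neg e3]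
          ring
  rw [List.map_congr_left hpoint, pvSumAdd, pvSumAdd, pvHitC, pvHitC, pvHitC]
  have hA : (if (0:Int) ≤ (r:Int)-1 ∧ (r:Int)-1 < (m.length:Int) then
        getv m ((r:Int)-1) ((c:Int)-1) + getv m ((r:Int)-1) (c:Int) + getv m ((r:Int)-1) ((c:Int)+1)
      else 0)
      = getv m ((r:Int)-1) ((c:Int)-1) + getv m ((r:Int)-1) (c:Int) + getv m ((r:Int)-1) ((c:Int)+1) := by
    by_cases h : (0:Int) ≤ (r:Int)-1
    · rw [if_pos ⟨h, by omega⟩]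
    · rw [if_neg (by omega), pvGetv_oob m _ _ (Or.inl (by omega)),
        pvGetv_oob m _ _ (Or.inl (by omega)), pvGetv_oob m _ _ (Or.inl (by omega))]
      ring
  have hB : (if (0:Int) ≤ (r:Int) ∧ (r:Int) < (m.length:Int) then
        getv m (r:Int) ((c:Int)-1) + getv m (r:Int) ((c:Int)+1)
      else 0)
      = getv m (r:Int) ((c:Int)-1) + getv m (r:Int) ((c:Int)+1) := by
    rw [if_pos ⟨by omega, by omega⟩]
  have hC : (if (0:Int) ≤ (r:Int)+1 ∧ (r:Int)+1 < (m.length:Int) then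
        getv m ((r:Int)+1) ((c:Int)-1) + getv m ((r:Int)+1) (c:Int) + getv m ((r:Int)+1) ((c:Int)+1)
      else 0)
      = getv m ((r:Int)+1) ((c:Int)-1) + getv m ((r:Int)+1) (c:Int) + getv m ((r:Int)+1) ((c:Int)+1) := by
    by_cases h : (r:Int)+1 < (m.length:Int)
    · rw [if_pos ⟨by omega, h⟩]
    · rw [if_neg (by omega), pvGetv_oob m _ _ (Or.inr (by omega)),
        pvGetv_oob m _ _ (Or.inr (by omega)), pvGetv_oob m _ _ (Or.inr (by omega))]
      ring
  rw [hA, hB, hC]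
  ring

-- ===== VERDICT (by name: the statement is the Claim_ definition above) =====
theorem solution_spec : Claim_equal_solution := by
  intro m _
  unfold Spec_solution
  have hshape := pvShape_alt m
  have hlen : (solution_alt m).length = m.length := by
    have := congrArg List.length hshape; simpa using this
  apply List.ext_getElem
  · simp [solution, hlen]
  · intro i h1 h2
    have him : i < m.length := by simpa [solution] using h1
    have hrowlen : (solution_alt m)[i].length = (m.getD i []).length := by
      have h3 := congrArg (fun l => l[i]?) hshape
      simp only [List.getElem?_map,
        List.getElem?_eq_getElem (show i < (solution_alt m).length by omega),
        List.getElem?_eq_getElem him, Option.map_some] at h3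
      rw [List.getD_eq_getElem _ _ him]
      exact Option.some.inj h3
    apply List.ext_getElem
    · simp [solution, hrowlen]
    · intro j hj1 hj2
      have hjm : j < (m.getD i []).length := by simpa [solution] using hj1
      have hB : (solution_alt m)[i][j] = pvGet (solution_alt m) i j := by
        unfold pvGet
        rw [List.getD_eq_getElem _ _ (show i < (solution_alt m).length by omega),
          List.getD_eq_getElem _ _ (show j < (solution_alt m)[i].length by omega)]
      rw [hB, pvMain m i j him hjm]
      simp [solution]
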